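-- pv_equiv track=rewrite | github.com/performlikemj/the-academy-watch | academy-watch-backend/src/api_football_client.py | is_new_loan_transfer
-- ===== SOURCE A (Python) =====
-- LOAN_RETURN_TYPES = {'back from loan', 'return from loan', 'end of loan', 'loan end', 'loan return'}
--
-- def is_new_loan_transfer(transfer_type: str) -> bool:
--     """
--     Check if a transfer type indicates a NEW loan (not a return from loan).
--
--     This is critical for correct parent/loan team assignment:
--     - For a NEW loan: teams.out = parent club, teams.in = loan club
--     - For a loan RETURN: teams.out = loan club, teams.in = parent club
--
--     If we misidentify a loan return as a new loan, the teams get swapped!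
--
--     Args:
--         transfer_type: The transfer type string from API-Football
--
--     Returns:
--         True if this is a NEW loan transfer, False otherwise
--     """
--     if not transfer_type:
--         return False
--
--     normalized = transfer_type.strip().lower()
--
--     # Explicitly exclude loan returns
--     if normalized in LOAN_RETURN_TYPES:
--         return False
--
--     # Also check for partial matches to loan return patterns
--     for return_pattern in LOAN_RETURN_TYPES:
--         if return_pattern in normalized:
--             return False
--
--     # Now check if it's an actual loan
--     # We use exact match to avoid false positives
--     return normalized == 'loan'
-- ===== SOURCE B (Python) =====
-- def is_new_loan_transfer(transfer_type: str) -> bool: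
--     # A new loan is exactly the normalized string 'loan'; no loan-return
--     # pattern can match 'loan', so the exclusion scan is unnecessary.
--     if not transfer_type:
--         return False
--     return transfer_type.strip().lower() == 'loan'
-- ===== Notes on version B (the rewrite author's own statement) =====
-- stated objective: simpler
-- what changed: Dropped the loan-return set membership test and the substring-exclusion loop entirely: the single accepted keyword is never in the exclusion set and no exclusion pattern can occur inside it, so the function reduces to one equality test on the normalized string.
import Mathlib
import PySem

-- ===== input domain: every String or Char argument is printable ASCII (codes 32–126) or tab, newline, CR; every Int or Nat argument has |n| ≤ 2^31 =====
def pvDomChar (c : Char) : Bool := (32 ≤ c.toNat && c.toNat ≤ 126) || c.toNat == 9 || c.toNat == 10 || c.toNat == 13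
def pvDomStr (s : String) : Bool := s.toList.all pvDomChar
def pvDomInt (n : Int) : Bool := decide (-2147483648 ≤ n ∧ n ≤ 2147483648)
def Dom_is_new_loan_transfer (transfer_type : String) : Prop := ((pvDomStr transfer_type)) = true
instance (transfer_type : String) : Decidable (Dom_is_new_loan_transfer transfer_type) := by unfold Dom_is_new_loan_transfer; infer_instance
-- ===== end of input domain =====

-- B drops the loan-return exclusion set/loop: the single accepted keyword can never
-- match any exclusion pattern, so one equality test on the normalized string suffices (simpler).
-- ===== PORT A =====
def LOAN_RETURN_TYPES : PySem.Set String :=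
  PySem.Set.ofList ["back from loan", "return from loan", "end of loan", "loan end", "loan return"]

def is_new_loan_transfer (transfer_type : String) : Bool :=
  if transfer_type == "" then false
  else
    let normalized := PySem.Str.lower (PySem.Str.strip transfer_type)
    if LOAN_RETURN_TYPES.contains normalized then false
    else if LOAN_RETURN_TYPES.any (fun p => PySem.Str.isIn p normalized) then false
    else normalized == "loan"

-- ===== PORT B =====
def is_new_loan_transfer_alt (transfer_type : String) : Bool :=
  if transfer_type == "" then false
  else PySem.Str.lower (PySem.Str.strip transfer_type) == "loan"

-- ===== PRECONDITION & SPEC =====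
def Spec_is_new_loan_transfer (transfer_type : String) (out : Bool) : Prop := out = is_new_loan_transfer_alt transfer_type
instance (transfer_type : String) (out : Bool) : Decidable (Spec_is_new_loan_transfer transfer_type out) := by unfold Spec_is_new_loan_transfer; infer_instance

-- ===== CLAIM (what is proved, stated in full; the proofs are below) =====
def Claim_equal_is_new_loan_transfer : Prop := ∀ (transfer_type : String), Dom_is_new_loan_transfer transfer_type → Spec_is_new_loan_transfer transfer_type (is_new_loan_transfer transfer_type)

-- ===== LEMMAS AND PROOFS =====

-- ===== VERDICT (by name: the statement is the Claim_ definition above) =====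
-- If the normalized string is "loan", no exclusion branch fires (a decidable fact
-- about the fixed pattern list); otherwise every branch of A returns false, as does B.
theorem is_new_loan_transfer_spec : Claim_equal_is_new_loan_transfer := by
  intro s _
  unfold Spec_is_new_loan_transfer is_new_loan_transfer is_new_loan_transfer_alt
  by_cases hs : s == ""
  · simp [hs]
  · simp only [hs, Bool.false_eq_true, if_false]
    by_cases h : PySem.Str.lower (PySem.Str.strip s) = "loan"
    · rw [h]; decide
    · have hb : (PySem.Str.lower (PySem.Str.strip s) == "loan") = false := by
        simp [h]
      simp only [hb]
      split
      · rfl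
      · split <;> rfl
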